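-- pv_equiv track=rewrite | github.com/Ludwig-H/ParallelCondensedMSTBoruvka | src/parallel_condensed_mst_boruvka/core.py | _descendants_events
-- ===== SOURCE A (Python) =====
-- def _descendants_events(ev_children, root):
--     """
--     Renvoie la liste des événements (ids >= N) dans le sous-arbre de 'root' (root inclus si c'est un événement).
--     """
--     out = []
--     stack = [root]
--     while stack:
--         x = stack.pop()
--         if x in ev_children:
--             out.append(x)
--             stack.extend(ev_children[x])
--     return out
-- ===== SOURCE B (Python) =====
-- def _descendants_events(ev_children, root):
--     out = []
--
--     def visit(x):
--         if x in ev_children: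
--             out.append(x)
--             for c in reversed(ev_children[x]):
--                 visit(c)
--
--     visit(root)
--     return out
-- ===== Notes on version B (the rewrite author's own statement) =====
-- stated objective: simpler
-- what changed: Replaces the explicit while-loop stack machine by a recursive DFS helper with a shared accumulator (children visited in reversed order, which is A's LIFO pop order).
import Mathlib
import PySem

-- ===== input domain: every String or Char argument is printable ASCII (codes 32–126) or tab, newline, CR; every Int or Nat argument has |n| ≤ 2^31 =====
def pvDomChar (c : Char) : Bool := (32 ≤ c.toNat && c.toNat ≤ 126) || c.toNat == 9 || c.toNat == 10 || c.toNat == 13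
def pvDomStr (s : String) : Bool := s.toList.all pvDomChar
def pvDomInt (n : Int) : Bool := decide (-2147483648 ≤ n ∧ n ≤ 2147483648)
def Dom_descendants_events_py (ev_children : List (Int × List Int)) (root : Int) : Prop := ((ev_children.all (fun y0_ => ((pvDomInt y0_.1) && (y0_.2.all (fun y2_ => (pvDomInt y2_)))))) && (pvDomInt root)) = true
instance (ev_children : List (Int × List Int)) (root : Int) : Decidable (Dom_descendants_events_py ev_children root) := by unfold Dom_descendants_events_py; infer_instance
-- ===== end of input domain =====

-- B replaces A's explicit while-loop stack machine by a recursive DFS helper with a shared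
-- accumulator (children visited in reversed order, which is exactly A's LIFO pop order): simpler decomposition, same cost.
-- Both ports carry a Nat fuel argument purely as a totalization guard (A's while-loop and B's
-- recursion are not structurally terminating in Lean); within Pre_ the fuel is proved sufficient.

-- dict lookup on the items list of the Python dict: `pvLk l x` = `l[x]` if `x in l` else None
-- (definitionally PySem.Dict.get? ⟨l⟩ x: first match on the items list).
def pvLk (l : List (Int × List Int)) (x : Int) : Option (List Int) :=
  (l.find? (fun p => p.1 == x)).map (·.2)

-- ===== PORT A =====
-- fuel for A's while-loop: (max children-list length + 1)^(number of keys + 1), an upper bound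
-- (proved below, under Pre_) on the number of loop iterations.
def pvMaxLen (l : List (Int × List Int)) : Nat := (l.map (fun p => p.2.length)).foldr max 0

def pvAFuel (l : List (Int × List Int)) : Nat := (pvMaxLen l + 1) ^ (l.length + 1)

-- while stack: x = stack.pop(); if x in ev_children: out.append(x); stack.extend(ev_children[x])
-- stack is kept top-first, so `.extend(cs)` pushes cs.reverse in front.
def pvALoop : Nat → List (Int × List Int) → List Int → List Int → List Int
  | 0, _, _, out => out
  | f + 1, l, stack, out =>
    match stack with
    | [] => out
    | x :: rest =>
      match pvLk l x with
      | some cs => pvALoop f l (cs.reverse ++ rest) (out ++ [x])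
      | none => pvALoop f l rest out

def descendants_events_py (ev_children : List (Int × List Int)) (root : Int) : List Int :=
  pvALoop (pvAFuel (PySem.Dict.ofList ev_children).items) (PySem.Dict.ofList ev_children).items [root] []

-- ===== PORT B =====
-- def visit(x): if x in ev_children: out.append(x); for c in reversed(ev_children[x]): visit(c)
-- fuel = recursion depth bound (number of keys + 1, proved sufficient under Pre_).
def pvVisit : Nat → List (Int × List Int) → Int → List Int → List Int
  | 0, _, _, out => out
  | f + 1, l, x, out =>
    match pvLk l x with
    | some cs => cs.reverse.foldl (fun acc c => pvVisit f l c acc) (out ++ [x])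
    | none => out

def descendants_events_py_alt (ev_children : List (Int × List Int)) (root : Int) : List Int :=
  pvVisit ((PySem.Dict.ofList ev_children).items.length + 1) (PySem.Dict.ofList ev_children).items root []

-- ===== PRECONDITION & SPEC =====
-- `pvReach f l x y` = there is a chain of child-edges of length ≤ f from x to y.
def pvReach : Nat → List (Int × List Int) → Int → Int → Bool
  | 0, _, x, y => x == y
  | f + 1, l, x, y => x == y ||
      (match pvLk l x with
       | some cs => cs.any (fun c => pvReach f l c y)
       | none => false)

-- `pvCyc f l k` = some child of k reaches k back within f steps (k lies on a cycle).
def pvCyc (f : Nat) (l : List (Int × List Int)) (k : Int) : Bool :=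
  match pvLk l k with
  | some cs => cs.any (fun c => pvReach f l c k)
  | none => false

-- no key of the dict that is reachable from root lies on a cycle (fuel l.length detects every
-- shortest path and shortest cycle, whose inner nodes are distinct keys).
def pvNoCycFrom (l : List (Int × List Int)) (root : Int) : Bool :=
  l.all (fun p => !(pvReach l.length l root p.1) || !(pvCyc l.length l p.1))

-- Pre_ excludes exactly the inputs on which Python A never returns: a key of ev_children that is
-- reachable from root and lies on a child-edge cycle makes A's while-loop run forever.
def Pre_descendants_events_py (ev_children : List (Int × List Int)) (root : Int) : Prop :=
  pvNoCycFrom (PySem.Dict.ofList ev_children).items root = true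
instance (ev_children : List (Int × List Int)) (root : Int) : Decidable (Pre_descendants_events_py ev_children root) := by unfold Pre_descendants_events_py; infer_instance

def pvWitness_descendants_events_py : (List (Int × List Int)) × Int := ([(10, [20, 21]), (20, [])], 10)

def Spec_descendants_events_py (ev_children : List (Int × List Int)) (root : Int) (out : List Int) : Prop := out = descendants_events_py_alt ev_children root
instance (ev_children : List (Int × List Int)) (root : Int) (out : List Int) : Decidable (Spec_descendants_events_py ev_children root out) := by unfold Spec_descendants_events_py; infer_instance

-- ===== CLAIM (what is proved, stated in full; the proofs are below) =====
def Claim_equal_descendants_events_py : Prop := ∀ (ev_children : List (Int × List Int)) (root : Int), Dom_descendants_events_py ev_children root → Pre_descendants_events_py ev_children root → Spec_descendants_events_py ev_children root (descendants_events_py ev_children root)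

-- ===== LEMMAS AND PROOFS =====

-- all definitions below are proof-side only (used by no port)
-- pure (accumulator-free) DFS, the common reference point of both ports
def pvDfs : Nat → List (Int × List Int) → Int → List Int
  | 0, _, _ => []
  | f + 1, l, x =>
    match pvLk l x with
    | some cs => x :: cs.reverse.flatMap (pvDfs f l)
    | none => []
-- "fuel f suffices for a full DFS from x"
def pvOK : Nat → List (Int × List Int) → Int → Bool
  | 0, _, _ => false
  | f + 1, l, x =>
    match pvLk l x with
    | some cs => cs.all (pvOK f l)
    | none => true
-- number of nodes the DFS from x visits (= pops A's while-loop spends on x's subtree)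
def pvSz : Nat → List (Int × List Int) → Int → Nat
  | 0, _, _ => 1
  | f + 1, l, x =>
    match pvLk l x with
    | some cs => 1 + (cs.map (pvSz f l)).sum
    | none => 1
-- `x` has the child-edge to `c`
def pvChild (l : List (Int × List Int)) (x c : Int) : Bool :=
  match pvLk l x with
  | some cs => cs.contains c
  | none => false
-- consecutive elements are joined by child-edges
def pvWalk (l : List (Int × List Int)) : List Int → Bool
  | x :: y :: rest => pvChild l x y && pvWalk l (y :: rest)
  | _ => true

theorem pvChild_elim (l : List (Int × List Int)) (x c : Int) (h : pvChild l x c = true) :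
    ∃ cs, pvLk l x = some cs ∧ c ∈ cs := by
  unfold pvChild at h
  cases hc : pvLk l x with
  | none => rw [hc] at h; simp at h
  | some cs => rw [hc] at h; exact ⟨cs, rfl, by simpa using h⟩

theorem pvLk_some_mem_keys (l : List (Int × List Int)) (x : Int) (cs : List Int)
    (h : pvLk l x = some cs) : x ∈ l.map Prod.fst := by
  unfold pvLk at h
  cases hf : l.find? (fun p => p.1 == x) with
  | none => rw [hf] at h; simp at h
  | some p =>
    have hpx : p.1 = x := by simpa using List.find?_some hf
    exact hpx ▸ List.mem_map_of_mem (List.mem_of_find?_eq_some hf)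

theorem pvReach_succ (l : List (Int × List Int)) :
    ∀ f x y, pvReach f l x y = true → pvReach (f + 1) l x y = true := by
  intro f
  induction f with
  | zero =>
    intro x y h
    unfold pvReach at h ⊢
    rw [h]; rfl
  | succ f ih =>
    intro x y h
    unfold pvReach at h ⊢
    rcases Bool.or_eq_true_iff.mp h with h | h
    · rw [h]; rfl
    · apply Bool.or_eq_true_iff.mpr; right
      cases hc : pvLk l x with
      | none => rw [hc] at h; simp at h
      | some cs =>
        rw [hc] at h
        show cs.any (fun c => pvReach (f + 1) l c y) = true
        simp only [List.any_eq_true] at h ⊢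
        obtain ⟨c, hcc, hr⟩ := h
        exact ⟨c, hcc, ih c y hr⟩

theorem pvReach_mono (l : List (Int × List Int)) (f g : Nat) (x y : Int) (hfg : f ≤ g)
    (h : pvReach f l x y = true) : pvReach g l x y = true := by
  induction g with
  | zero => have : f = 0 := by omega
            exact this ▸ h
  | succ g ih =>
    by_cases hf : f = g + 1
    · exact hf ▸ h
    · exact pvReach_succ l g x y (ih (by omega))

theorem pvReach_step (l : List (Int × List Int)) (f : Nat) (x c y : Int) (cs : List Int)
    (hc : pvLk l x = some cs) (hm : c ∈ cs) (h : pvReach f l c y = true) :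
    pvReach (f + 1) l x y = true := by
  unfold pvReach
  rw [hc]
  apply Bool.or_eq_true_iff.mpr; right
  simp only [List.any_eq_true]
  exact ⟨c, hm, h⟩

theorem pvWalk_tail (l : List (Int × List Int)) (x : Int) (w : List Int)
    (h : pvWalk l (x :: w) = true) : pvWalk l w = true := by
  cases w with
  | nil => rfl
  | cons y rest =>
    unfold pvWalk at h
    exact (Bool.and_eq_true_iff.mp h).2

theorem pvWalk_drop (l : List (Int × List Int)) :
    ∀ (i : Nat) (v : List Int), pvWalk l v = true → pvWalk l (v.drop i) = true := by
  intro i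
  induction i with
  | zero => intro v h; simpa using h
  | succ i ih =>
    intro v h
    cases v with
    | nil => rfl
    | cons x rest =>
      exact ih rest (pvWalk_tail l x rest h)

theorem pvNotOK_walk (l : List (Int × List Int)) :
    ∀ f x, pvOK f l x = false → ∃ w : List Int, pvWalk l (x :: w) = true ∧ w.length = f := by
  intro f
  induction f with
  | zero => intro x _; exact ⟨[], rfl, rfl⟩
  | succ f ih =>
    intro x h
    unfold pvOK at h
    cases hc : pvLk l x with
    | none => rw [hc] at h; simp at h
    | some cs =>
      rw [hc] at h
      have : ∃ c ∈ cs, pvOK f l c = false := by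
        by_contra hno
        have : cs.all (pvOK f l) = true := by
          simp only [List.all_eq_true]
          intro c hcc
          by_contra hcf
          exact hno ⟨c, hcc, by simpa using hcf⟩
        have h' : cs.all (pvOK f l) = false := h
        rw [this] at h'; simp at h'
      obtain ⟨c, hcc, hcf⟩ := this
      obtain ⟨w, hw, hlen⟩ := ih c hcf
      refine ⟨c :: w, ?_, by simpa using hlen⟩
      unfold pvWalk
      apply Bool.and_eq_true_iff.mpr
      constructor
      · unfold pvChild
        rw [hc]
        simpa using hcc
      · exact hw

theorem pvWalk_reach (l : List (Int × List Int)) :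
    ∀ (w : List Int) (x : Int) (i : Nat) (hi : i < (x :: w).length),
      pvWalk l (x :: w) = true → pvReach i l x ((x :: w)[i]) = true := by
  intro w
  induction w with
  | nil =>
    intro x i hi _
    have hi0 : i = 0 := by simp at hi; omega
    subst hi0
    simp [pvReach]
  | cons c w' ih =>
    intro x i hi hw
    unfold pvWalk at hw
    obtain ⟨hxc, hw'⟩ := Bool.and_eq_true_iff.mp hw
    cases i with
    | zero => simp [pvReach]
    | succ i =>
      have hi' : i < (c :: w').length := by simpa using hi
      have hr := ih c i hi' hw'
      obtain ⟨cs, hlk, hm⟩ := pvChild_elim l x c hxc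
      have : (x :: c :: w')[i + 1] = (c :: w')[i] := rfl
      rw [this]
      exact pvReach_step l i x c _ cs hlk hm hr

theorem pvWalk_get_child (l : List (Int × List Int)) (v : List Int) (i : Nat)
    (hi : i + 1 < v.length) (hw : pvWalk l v = true) :
    pvChild l (v[i]'(by omega)) (v[i+1]'hi) = true := by
  have hd := pvWalk_drop l i v hw
  rw [List.drop_eq_getElem_cons (by omega : i < v.length)] at hd
  rw [List.drop_eq_getElem_cons hi] at hd
  unfold pvWalk at hd
  exact (Bool.and_eq_true_iff.mp hd).1

-- Pre_ ⇒ the DFS from root terminates within depth l.length + 1: otherwise A's walk of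
-- length l.length + 1 visits l.length + 1 keys, two of which coincide (pigeonhole on the
-- Nodup key list), exhibiting a reachable key on a cycle.
theorem pvGetElem_idx_congr (v : List Int) (i j : Nat) (h : i = j) (hi : i < v.length) :
    v[i]'hi = v[j]'(h ▸ hi) := by subst h; rfl

theorem pvWalk_reach' (l : List (Int × List Int)) (v : List Int) (hw : pvWalk l v = true)
    (i : Nat) (hi : i < v.length) (h0 : 0 < v.length) :
    pvReach i l (v[0]'h0) (v[i]'hi) = true := by
  cases v with
  | nil => simp at h0
  | cons x w => exact pvWalk_reach l w x i hi hw

-- Pre_ ⇒ the DFS from root terminates within depth l.length + 1: otherwise the failing branch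
-- is a walk visiting l.length + 1 keys, two of which coincide (pigeonhole on the Nodup key
-- list), exhibiting a reachable key on a cycle.
theorem pvOK_of_pre (l : List (Int × List Int)) (root : Int)
    (hpre : pvNoCycFrom l root = true) :
    pvOK (l.length + 1) l root = true := by
  by_contra h
  rw [Bool.not_eq_true] at h
  obtain ⟨w, hw, hlen⟩ := pvNotOK_walk l (l.length + 1) root h
  have hvl : (root :: w).length = l.length + 2 := by simp [hlen]
  have hkey : ∀ (i : Nat) (hi : i + 1 < (root :: w).length),
      (root :: w)[i]'(by omega) ∈ l.map Prod.fst := by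
    intro i hi
    obtain ⟨cs, hlk, _⟩ := pvChild_elim l _ _ (pvWalk_get_child l (root :: w) i hi hw)
    exact pvLk_some_mem_keys l _ cs hlk
  have htl : ((root :: w).take (l.length + 1)).length = l.length + 1 := by
    rw [List.length_take]; omega
  have hnotnd : ¬ ((root :: w).take (l.length + 1)).Nodup := by
    intro hnd
    have hsub : (root :: w).take (l.length + 1) ⊆ l.map Prod.fst := by
      intro a ha
      obtain ⟨i, hi, he⟩ := List.getElem_of_mem ha
      rw [← he, List.getElem_take]
      exact hkey i (by rw [htl] at hi; omega)
    have h1 := List.toFinset_card_of_nodup hnd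
    have h2 : ((root :: w).take (l.length + 1)).toFinset ⊆ (l.map Prod.fst).toFinset := by
      intro a ha; rw [List.mem_toFinset] at *; exact hsub ha
    have h3 := le_trans (Finset.card_le_card h2) (l.map Prod.fst).toFinset_card_le
    rw [h1, htl] at h3
    simp at h3
  rw [List.nodup_iff_getElem?_ne_getElem?] at hnotnd
  push Not at hnotnd
  obtain ⟨i, j, hij, hjl, hdup⟩ := hnotnd
  rw [htl] at hjl
  have hiv : i < (root :: w).length := by omega
  have hjv : j < (root :: w).length := by omega
  have hvij : (root :: w)[i]'hiv = (root :: w)[j]'hjv := by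
    rw [List.getElem?_eq_getElem (by rw [htl]; omega : i < ((root :: w).take (l.length + 1)).length),
      List.getElem?_eq_getElem (by rw [htl]; omega : j < ((root :: w).take (l.length + 1)).length)] at hdup
    have hd2 := Option.some.inj hdup
    rwa [List.getElem_take, List.getElem_take] at hd2
  -- (root :: w)[i] is a reachable key
  have hireach : pvReach l.length l root ((root :: w)[i]'hiv) = true :=
    pvReach_mono l i l.length _ _ (by omega) (pvWalk_reach l w root i hiv hw)
  -- … that lies on a cycle: its child (root :: w)[i+1] reaches (root :: w)[j] = (root :: w)[i]
  have hchild := pvWalk_get_child l (root :: w) i (by omega) hw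
  obtain ⟨cs, hlk, hmemcs⟩ := pvChild_elim l _ _ hchild
  have hd : pvWalk l ((root :: w).drop (i + 1)) = true := pvWalk_drop l (i + 1) (root :: w) hw
  have hdl : ((root :: w).drop (i + 1)).length = l.length + 1 - i := by
    rw [List.length_drop]; omega
  have h0 : 0 < ((root :: w).drop (i + 1)).length := by omega
  have hidx : j - i - 1 < ((root :: w).drop (i + 1)).length := by omega
  have hr := pvWalk_reach' l _ hd (j - i - 1) hidx h0
  rw [List.getElem_drop, List.getElem_drop] at hr
  rw [pvGetElem_idx_congr (root :: w) (i + 1 + 0) (i + 1) (by omega),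
    pvGetElem_idx_congr (root :: w) (i + 1 + (j - i - 1)) j (by omega), ← hvij] at hr
  have hcyc : pvCyc l.length l ((root :: w)[i]'hiv) = true := by
    unfold pvCyc
    rw [hlk]
    simp only [List.any_eq_true]
    exact ⟨_, hmemcs, pvReach_mono l (j - i - 1) l.length _ _ (by omega) hr⟩
  obtain ⟨p, hp, hp1⟩ := List.mem_map.mp (hkey i (by omega))
  unfold pvNoCycFrom at hpre
  rw [List.all_eq_true] at hpre
  have hcontra := hpre p hp
  rw [hp1, hireach, hcyc] at hcontra
  simp at hcontra

theorem pvMono (l : List (Int × List Int)) :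
    ∀ f y, pvOK f l y = true → pvOK (f + 1) l y = true ∧
      pvDfs (f + 1) l y = pvDfs f l y ∧ pvSz (f + 1) l y = pvSz f l y := by
  intro f
  induction f with
  | zero => intro y h; simp [pvOK] at h
  | succ f ih =>
    intro y h
    cases hc : pvLk l y with
    | none => unfold pvOK pvDfs pvSz; rw [hc]; exact ⟨rfl, rfl, rfl⟩
    | some cs =>
      unfold pvOK at h
      rw [hc] at h
      simp only [List.all_eq_true] at h
      refine ⟨?_, ?_, ?_⟩
      · show pvOK (f + 1 + 1) l y = true
        unfold pvOK; rw [hc]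
        simp only [List.all_eq_true]
        exact fun c hcc => (ih c (h c hcc)).1
      · show pvDfs (f + 1 + 1) l y = pvDfs (f + 1) l y
        unfold pvDfs; rw [hc]
        simp only [List.cons.injEq, true_and]
        exact List.flatMap_congr fun c hcc => (ih c (h c (List.mem_reverse.mp hcc))).2.1
      · show pvSz (f + 1 + 1) l y = pvSz (f + 1) l y
        unfold pvSz; rw [hc]
        show 1 + (cs.map (pvSz (f + 1) l)).sum = 1 + (cs.map (pvSz f l)).sum
        rw [List.map_congr_left fun c hcc => (ih c (h c hcc)).2.2]

theorem pvSz_pos (f : Nat) (l : List (Int × List Int)) (y : Int) : 1 ≤ pvSz f l y := by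
  cases f with
  | zero => simp [pvSz]
  | succ f => unfold pvSz; cases pvLk l y <;> simp

theorem pvLk_len (l : List (Int × List Int)) (x : Int) (cs : List Int)
    (h : pvLk l x = some cs) : cs.length ≤ pvMaxLen l := by
  induction l with
  | nil => simp [pvLk] at h
  | cons p t ih =>
    simp only [pvMaxLen, List.map_cons, List.foldr_cons]
    by_cases hp : (p.1 == x) = true
    · have : cs = p.2 := by unfold pvLk at h; simp [hp] at h; exact h.symm
      subst this; omega
    · rw [Bool.not_eq_true] at hp
      have hlt : pvLk t x = some cs := by
        unfold pvLk at h ⊢; rw [List.find?_cons, hp] at h; exact h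
      have := ih hlt
      simp only [pvMaxLen] at this
      omega

-- the DFS tree with depth ≤ f has at most (max branching + 1)^f nodes (no shape assumption)
theorem pvSz_le (l : List (Int × List Int)) :
    ∀ f x, pvSz f l x ≤ (pvMaxLen l + 1) ^ f := by
  intro f
  induction f with
  | zero => intro x; simp [pvSz]
  | succ f ih =>
    intro x
    have hone : 1 ≤ (pvMaxLen l + 1) ^ f := Nat.one_le_pow _ _ (by omega)
    cases hc : pvLk l x with
    | none =>
      unfold pvSz; rw [hc]
      calc 1 ≤ (pvMaxLen l + 1) ^ f := hone
        _ ≤ (pvMaxLen l + 1) ^ (f + 1) := Nat.pow_le_pow_right (by omega) (by omega)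
    | some cs =>
      unfold pvSz; rw [hc]
      have hsum : (cs.map (pvSz f l)).sum ≤ cs.length * (pvMaxLen l + 1) ^ f := by
        calc (cs.map (pvSz f l)).sum
            ≤ (cs.map (fun _ => (pvMaxLen l + 1) ^ f)).sum := by
              apply List.sum_le_sum
              intro c hcc
              exact ih c
          _ = cs.length * (pvMaxLen l + 1) ^ f := by
              simp [List.map_const', List.sum_replicate, smul_eq_mul]
      have hcl : cs.length ≤ pvMaxLen l := pvLk_len l x cs hc
      calc 1 + (cs.map (pvSz f l)).sum
          ≤ 1 + pvMaxLen l * (pvMaxLen l + 1) ^ f := by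
            have := le_trans hsum (Nat.mul_le_mul_right _ hcl)
            omega
        _ ≤ (pvMaxLen l + 1) ^ f + pvMaxLen l * (pvMaxLen l + 1) ^ f := by omega
        _ = (pvMaxLen l + 1) ^ (f + 1) := by ring

theorem pvALoop_nil (f : Nat) (l : List (Int × List Int)) (out : List Int) :
    pvALoop f l [] out = out := by cases f <;> rfl

theorem pvALoop_cons_none (f : Nat) (l : List (Int × List Int)) (x : Int)
    (rest out : List Int) (hc : pvLk l x = none) :
    pvALoop (f + 1) l (x :: rest) out = pvALoop f l rest out := by
  simp only [pvALoop, hc]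

theorem pvALoop_cons_some (f : Nat) (l : List (Int × List Int)) (x : Int)
    (cs : List Int) (rest out : List Int) (hc : pvLk l x = some cs) :
    pvALoop (f + 1) l (x :: rest) out = pvALoop f l (cs.reverse ++ rest) (out ++ [x]) := by
  simp only [pvALoop, hc]

theorem pvALoop_eq (l : List (Int × List Int)) (g : Nat) :
    ∀ (f : Nat) (s out : List Int), (∀ y ∈ s, pvOK g l y = true) →
      (s.map (pvSz g l)).sum ≤ f →
      pvALoop f l s out = out ++ s.flatMap (pvDfs g l) := by
  intro f
  induction f with
  | zero =>
    intro s out hok hsz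
    cases s with
    | nil => simp [pvALoop_nil]
    | cons x rest =>
      exfalso
      have := pvSz_pos g l x
      simp only [List.map_cons, List.sum_cons] at hsz
      omega
  | succ f ih =>
    intro s out hok hsz
    cases s with
    | nil => simp [pvALoop_nil]
    | cons x rest =>
      have hokx := hok x (List.mem_cons_self)
      have hokrest : ∀ y ∈ rest, pvOK g l y = true :=
        fun y hy => hok y (List.mem_cons_of_mem x hy)
      cases hg : g with
      | zero => rw [hg] at hokx; simp [pvOK] at hokx
      | succ g' =>
      subst hg
      simp only [List.map_cons, List.sum_cons] at hsz
      cases hc : pvLk l x with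
      | none =>
        have hdx : pvDfs (g' + 1) l x = [] := by unfold pvDfs; rw [hc]
        have hsx : pvSz (g' + 1) l x = 1 := by unfold pvSz; rw [hc]
        rw [pvALoop_cons_none f l x rest out hc,
          ih rest out hokrest (by omega)]
        simp [hdx]
      | some cs =>
        unfold pvOK at hokx
        rw [hc] at hokx
        simp only [List.all_eq_true] at hokx
        have hlift : ∀ c ∈ cs, pvOK (g' + 1) l c = true ∧
            pvDfs (g' + 1) l c = pvDfs g' l c ∧ pvSz (g' + 1) l c = pvSz g' l c :=
          fun c hcc => pvMono l g' c (hokx c hcc)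
        have hdx : pvDfs (g' + 1) l x = x :: cs.reverse.flatMap (pvDfs (g' + 1) l) := by
          unfold pvDfs; rw [hc]
          simp only [List.cons.injEq, true_and]
          exact (List.flatMap_congr fun c hcc =>
            ((hlift c (List.mem_reverse.mp hcc)).2.1)).symm
        have hsx : pvSz (g' + 1) l x = 1 + (cs.map (pvSz (g' + 1) l)).sum := by
          unfold pvSz; rw [hc]
          show 1 + (cs.map (pvSz g' l)).sum = 1 + (cs.map (pvSz (g' + 1) l)).sum
          rw [List.map_congr_left fun c hcc => ((hlift c hcc).2.2).symm]
        have hoknew : ∀ y ∈ cs.reverse ++ rest, pvOK (g' + 1) l y = true := by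
          intro y hy
          rcases List.mem_append.mp hy with hy | hy
          · exact (hlift y (List.mem_reverse.mp hy)).1
          · exact hokrest y hy
        have hsznew : ((cs.reverse ++ rest).map (pvSz (g' + 1) l)).sum ≤ f := by
          rw [List.map_append, List.sum_append, List.map_reverse, List.sum_reverse]
          omega
        rw [pvALoop_cons_some f l x cs rest out hc, ih _ _ hoknew hsznew]
        simp [hdx, List.flatMap_append, List.append_assoc]

theorem pvVisit_eq (l : List (Int × List Int)) :
    ∀ (f : Nat) (x : Int) (out : List Int),
      pvVisit f l x out = out ++ pvDfs f l x := by
  intro f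
  induction f with
  | zero => intro x out; simp [pvVisit, pvDfs]
  | succ f ih =>
    intro x out
    cases hc : pvLk l x with
    | none =>
      unfold pvVisit pvDfs; rw [hc]
      show out = out ++ []
      simp
    | some cs =>
      unfold pvVisit pvDfs; rw [hc]
      show cs.reverse.foldl (fun acc c => pvVisit f l c acc) (out ++ [x])
        = out ++ x :: cs.reverse.flatMap (pvDfs f l)
      rw [PySem.List.foldl_congr_mem cs.reverse _ (fun acc c => acc ++ pvDfs f l c) _
        (fun acc c _ => ih c acc)]
      rw [PySem.List.foldl_append_eq_flatMap]
      simp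

-- ===== VERDICT (by name: the statement is the Claim_ definition above) =====
theorem descendants_events_py_spec : Claim_equal_descendants_events_py := by
  intro ev root _ hpre
  unfold Pre_descendants_events_py at hpre
  unfold Spec_descendants_events_py descendants_events_py descendants_events_py_alt
  set l := (PySem.Dict.ofList ev).items with hl
  have hok := pvOK_of_pre l root hpre
  rw [pvVisit_eq l (l.length + 1) root [],
    pvALoop_eq l (l.length + 1) (pvAFuel l) [root] []
      (fun y hy => (List.mem_singleton.mp hy) ▸ hok)
      (by simp only [List.map_cons, List.map_nil, List.sum_cons, List.sum_nil]
          have := pvSz_le l (l.length + 1) root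
          unfold pvAFuel
          omega)]
  simp
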